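-- pv_equiv track=rewrite | github.com/ChaitanyaSaiV/dsa | stack/reverse_some_chars.py | reverse_some_chars
-- ===== SOURCE A (Python) =====
-- def reverse_some_chars(s, chars):
--   stack = []
--   chars = set(chars)
--   for char in s:
--     if char in chars:
--       stack.append(char)
--
--   response = []
--
--   for char in s:
--     if char in chars:
--       response.append(stack.pop())
--     else:
--       response.append(char)
--
--   return "".join(response)
-- ===== SOURCE B (Python) =====
-- def reverse_some_chars(s, chars):
--   cs = set(chars)
--   i, j = 0, len(s) - 1
--   front, back = [], []
--   while i < j:
--     if s[i] not in cs:
--       front.append(s[i])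
--       i += 1
--     elif s[j] not in cs:
--       back.append(s[j])
--       j -= 1
--     else:
--       front.append(s[j])
--       back.append(s[i])
--       i += 1
--       j -= 1
--   if i == j:
--     front.append(s[i])
--   back.reverse()
--   return "".join(front) + "".join(back)
-- ===== Notes on version B (the rewrite author's own statement) =====
-- stated objective: alternative
-- what changed: Replaces A's two passes (collect the selected chars on a stack, then replay the string popping from it) by a single two-pointer pass that walks inwards from both ends and emits each matched pair of selected chars swapped.
import Mathlib
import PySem

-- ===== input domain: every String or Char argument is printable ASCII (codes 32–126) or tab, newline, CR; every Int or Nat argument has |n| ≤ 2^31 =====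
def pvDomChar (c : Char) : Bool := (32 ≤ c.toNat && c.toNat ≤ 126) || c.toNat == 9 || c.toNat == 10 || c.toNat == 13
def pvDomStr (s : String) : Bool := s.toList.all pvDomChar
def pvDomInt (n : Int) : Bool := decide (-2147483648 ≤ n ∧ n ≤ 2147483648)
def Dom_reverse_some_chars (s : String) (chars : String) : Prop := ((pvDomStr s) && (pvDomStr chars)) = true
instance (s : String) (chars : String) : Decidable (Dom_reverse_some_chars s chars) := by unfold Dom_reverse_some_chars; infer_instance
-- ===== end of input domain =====

-- B replaces A's two passes (collect selected chars on a stack, then replay popping) by a single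
-- two-pointer pass from both ends that emits the selected chars swapped in place (objective: alternative).

-- ===== PORT A =====
-- loop body of A's first pass: 'if char in chars: stack.append(char)'
def pvSelStep (mem : Char → Bool) (st : List Char) (c : Char) : List Char :=
  if mem c then st ++ [c] else st

-- loop body of A's second pass: 'response.append(stack.pop())' / 'response.append(char)'
-- (the 'none' branch is where Python's stack.pop() would raise IndexError; it is unreachable,
-- since the stack holds every selected char of s)
def pvReplayStep (mem : Char → Bool) (st_resp : List Char × List Char) (c : Char) :
    List Char × List Char :=
  if mem c then
    match PySem.List.pop? st_resp.1 with
    | some (v, st') => (st', st_resp.2 ++ [v])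
    | none => (st_resp.1, st_resp.2)
  else (st_resp.1, st_resp.2 ++ [c])

def reverse_some_chars (s : String) (chars : String) : String :=
  let cset : PySem.Set Char := PySem.Set.ofList chars.toList
  let mem : Char → Bool := fun c => PySem.Set.contains cset c
  let stack : List Char := s.toList.foldl (pvSelStep mem) []
  String.ofList (s.toList.foldl (pvReplayStep mem) (stack, [])).2

-- ===== PORT B =====
-- B's while loop: two indices walking inwards, 'front' collects the output's left part,
-- 'back' (reversed at the end) its right part; 'fuel' only bounds the number of loop
-- iterations to make the recursion structural (the caller passes enough for the loop to finish)
def pvTwoPtr (l : List Char) (p : Char → Bool) :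
    Nat → Int → Int → List Char → List Char → List Char
  | fuel + 1, i, j, front, back =>
    if i < j then
      if ¬ p (PySem.List.pyGetD l i ' ') then
        pvTwoPtr l p fuel (i + 1) j (front ++ [PySem.List.pyGetD l i ' ']) back
      else if ¬ p (PySem.List.pyGetD l j ' ') then
        pvTwoPtr l p fuel i (j - 1) front (back ++ [PySem.List.pyGetD l j ' '])
      else
        pvTwoPtr l p fuel (i + 1) (j - 1) (front ++ [PySem.List.pyGetD l j ' '])
          (back ++ [PySem.List.pyGetD l i ' '])
    else (if i = j then front ++ [PySem.List.pyGetD l i ' '] else front) ++ back.reverse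
  | 0, i, j, front, back =>
    (if i = j then front ++ [PySem.List.pyGetD l i ' '] else front) ++ back.reverse

def reverse_some_chars_alt (s : String) (chars : String) : String :=
  let cset : PySem.Set Char := PySem.Set.ofList chars.toList
  String.ofList (pvTwoPtr s.toList (fun c => PySem.Set.contains cset c) s.toList.length 0
    (PySem.List.len s.toList - 1) [] [])

-- ===== PRECONDITION & SPEC =====
def Spec_reverse_some_chars (s : String) (chars : String) (out : String) : Prop := out = reverse_some_chars_alt s chars
instance (s : String) (chars : String) (out : String) : Decidable (Spec_reverse_some_chars s chars out) := by unfold Spec_reverse_some_chars; infer_instance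

-- ===== CLAIM (what is proved, stated in full; the proofs are below) =====
def Claim_equal_reverse_some_chars : Prop := ∀ (s : String) (chars : String), Dom_reverse_some_chars s chars → Spec_reverse_some_chars s chars (reverse_some_chars s chars)

-- ===== LEMMAS AND PROOFS =====

-- common reference function: rebuild l, replacing its selected chars in order by the queue q's chars
def pvM (p : Char → Bool) : List Char → List Char → List Char
  | [], _ => []
  | c :: l, q => if p c then q.headD ' ' :: pvM p l q.tail else c :: pvM p l q

theorem pv_revDropLast (l : List Char) : l.dropLast.reverse = l.reverse.tail := by
  induction l with
  | nil => rfl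
  | cons a t ih =>
    cases t with
    | nil => rfl
    | cons b u =>
      simp only [List.dropLast_cons₂, List.reverse_cons] at *
      rw [ih]
      cases hu : u.reverse <;> simp

theorem pvM_queue_irrel (p : Char → Bool) :
    ∀ (a q r : List Char), (a.filter p).length ≤ q.length →
      pvM p a (q ++ r) = pvM p a q := by
  intro a
  induction a with
  | nil => intro q r _; rfl
  | cons c t ih =>
    intro q r h
    by_cases hc : p c
    · simp only [List.filter_cons, hc, if_pos, List.length_cons] at h
      cases q with
      | nil => simp at h
      | cons x q' =>
        simp only [pvM, hc, if_pos, List.cons_append, List.headD_cons, List.tail_cons]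
        rw [ih q' r (by simpa using h)]
    · simp only [List.filter_cons, hc] at h
      simp [pvM, hc]
      rw [ih q r (by simpa using h)]

theorem pvM_append (p : Char → Bool) :
    ∀ (a b q : List Char),
      pvM p (a ++ b) q = pvM p a q ++ pvM p b (q.drop (a.filter p).length) := by
  intro a
  induction a with
  | nil => intro b q; rfl
  | cons c t ih =>
    intro b q
    by_cases hc : p c
    · have hd : q.tail.drop (t.filter p).length = q.drop ((t.filter p).length + 1) := by
        rw [← List.drop_one, List.drop_drop]
        congr 1
        omega
      simp [pvM, hc, ih b q.tail, hd]
    · simp [pvM, hc, ih b q]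

-- B's specification value: l with its selected chars reversed among themselves
def pvBS (p : Char → Bool) (l : List Char) : List Char :=
  pvM p l (l.filter p).reverse

theorem pvBS_single (p : Char → Bool) (x : Char) : pvBS p [x] = [x] := by
  by_cases hx : p x <;> simp [pvBS, pvM, hx]

theorem pvBS_cons_not (p : Char → Bool) (c : Char) (t : List Char) (h : ¬ p c) :
    pvBS p (c :: t) = c :: pvBS p t := by
  simp [pvBS, pvM, h]

theorem pvBS_snoc_not (p : Char → Bool) (a : List Char) (d : Char) (h : ¬ p d) :
    pvBS p (a ++ [d]) = pvBS p a ++ [d] := by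
  unfold pvBS
  have hf : (a ++ [d]).filter p = a.filter p := by simp [List.filter_append, h]
  rw [hf, pvM_append]
  have hd : ((a.filter p).reverse).drop (a.filter p).length = [] := by
    apply List.drop_eq_nil_of_le; simp
  rw [hd]
  simp [pvM, h]

theorem pvBS_both (p : Char → Bool) (c d : Char) (a : List Char)
    (hc : p c) (hd : p d) :
    pvBS p (c :: (a ++ [d])) = d :: pvBS p a ++ [c] := by
  unfold pvBS
  have hf : (c :: (a ++ [d])).filter p = c :: (a.filter p ++ [d]) := by
    simp [List.filter_append, hc, hd]
  rw [hf]
  have hq : (c :: (a.filter p ++ [d])).reverse = (d :: (a.filter p).reverse) ++ [c] := by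
    simp
  rw [hq]
  simp only [pvM, hc, if_pos, List.cons_append, List.headD_cons, List.tail_cons]
  rw [pvM_append]
  have hlen : (a.filter p).length ≤ ((a.filter p).reverse).length := by simp
  rw [pvM_queue_irrel p a ((a.filter p).reverse) [c] hlen]
  have hdrop : (((a.filter p).reverse) ++ [c]).drop (a.filter p).length = [c] := by
    have : (a.filter p).length = ((a.filter p).reverse).length := by simp
    rw [this, List.drop_left]
  rw [hdrop]
  simp [pvM, hd]

-- A's first pass builds exactly the selected chars, in order
theorem pvSel_spec (mem : Char → Bool) :
    ∀ (l acc : List Char), l.foldl (pvSelStep mem) acc = acc ++ l.filter mem := by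
  intro l
  induction l with
  | nil => intro acc; simp
  | cons c t ih =>
    intro acc
    by_cases hc : mem c <;> simp [pvSelStep, hc, ih]

-- A's second pass, popping from the stack's back, is pvM on the stack's reverse
theorem pvReplay_spec (mem : Char → Bool) :
    ∀ (l st resp : List Char), (l.filter mem).length ≤ st.length →
      (l.foldl (pvReplayStep mem) (st, resp)).2 = resp ++ pvM mem l st.reverse := by
  intro l
  induction l with
  | nil => intro st resp _; simp [pvM]
  | cons c t ih =>
    intro st resp h
    by_cases hc : mem c
    · simp only [List.filter_cons, hc, if_pos, List.length_cons] at h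
      have hne : st ≠ [] := by
        intro hnil; rw [hnil] at h; simp at h
      have hst : st = st.dropLast ++ [st.getLast hne] := by
        exact (List.dropLast_append_getLast hne).symm
      rw [List.foldl_cons]
      have hpop : pvReplayStep mem (st, resp) c =
          (st.dropLast, resp ++ [st.getLast hne]) := by
        simp only [pvReplayStep, hc, if_pos]
        rw [show PySem.List.pop? st = some (st.getLast hne, st.dropLast) by
          conv_lhs => rw [hst]
          rw [PySem.List.pop?_last]]
      rw [hpop, ih st.dropLast _ (by simp [List.length_dropLast]; omega)]
      have hhead : st.reverse.headD ' ' = st.getLast hne := by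
        rw [List.headD_eq_head?_getD, List.head?_reverse]
        simp [List.getLast?_eq_getLast_of_ne_nil hne]
      simp only [pvM, hc, if_pos, pv_revDropLast, hhead]
      simp
    · simp only [List.filter_cons, hc] at h
      rw [List.foldl_cons]
      have : pvReplayStep mem (st, resp) c = (st, resp ++ [c]) := by
        simp [pvReplayStep, hc]
      rw [this, ih st _ (by simpa using h)]
      simp [pvM, hc]

-- exit step of B's loop (the trailing 'if i == j' and the join)
theorem pvTwoPtr_exit (l : List Char) (p : Char → Bool) (i j : Int)
    (front back : List Char) (h0 : 0 ≤ i) (hjl : j < l.length) (hij1 : i ≤ j + 1)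
    (hij : ¬ i < j) :
    ((if i = j then front ++ [PySem.List.pyGetD l i ' '] else front) ++ back.reverse) =
      front ++ pvBS p ((l.drop i.toNat).take (j + 1 - i).toNat) ++ back.reverse := by
  by_cases heq : i = j
  · subst heq
    rw [if_pos rfl]
    have hil : i.toNat < l.length := by omega
    have hget : PySem.List.pyGetD l i ' ' = l[i.toNat] :=
      PySem.List.pyGetD_eq_getElem l ' ' h0 (by omega)
    have hseg : (l.drop i.toNat).take (i + 1 - i).toNat = [l[i.toNat]] := by
      rw [show (i + 1 - i).toNat = 0 + 1 from by omega, List.drop_eq_getElem_cons hil,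
        List.take_succ_cons, List.take_zero]
    rw [hseg, pvBS_single, hget]
  · rw [if_neg heq]
    rw [show (j + 1 - i).toNat = 0 from by omega]
    simp [pvBS, pvM]

-- B's two-pointer loop computes pvBS of the untouched middle segment
theorem pvTwoPtr_spec (l : List Char) (p : Char → Bool) :
    ∀ (fuel : Nat) (i j : Int) (front back : List Char),
      0 ≤ i → j < l.length → i ≤ j + 1 → j - i ≤ fuel →
      pvTwoPtr l p fuel i j front back =
        front ++ pvBS p ((l.drop i.toNat).take (j + 1 - i).toNat) ++ back.reverse := by
  intro fuel
  induction fuel with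
  | zero =>
    intro i j front back h0 hjl hij1 hfu
    rw [pvTwoPtr]
    exact pvTwoPtr_exit l p i j front back h0 hjl hij1 (by omega)
  | succ fuel ih =>
    intro i j front back h0 hjl hij1 hfu
    by_cases hij : i < j
    · rw [pvTwoPtr, if_pos hij]
      have hil : i.toNat < l.length := by omega
      have hj0 : 0 ≤ j := by omega
      have hjn : j.toNat < l.length := by omega
      have hgeti : PySem.List.pyGetD l i ' ' = l[i.toNat] :=
        PySem.List.pyGetD_eq_getElem l ' ' h0 (by omega)
      have hgetj : PySem.List.pyGetD l j ' ' = l[j.toNat] :=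
        PySem.List.pyGetD_eq_getElem l ' ' hj0 (by omega)
      by_cases hskipi : ¬ p (PySem.List.pyGetD l i ' ')
      · rw [if_pos hskipi]
        rw [ih (i + 1) j _ _ (by omega) hjl (by omega) (by omega)]
        have hpfalse : p l[i.toNat] = false := by
          rw [hgeti] at hskipi; simpa using hskipi
        have hseg : (l.drop i.toNat).take (j + 1 - i).toNat =
            l[i.toNat] :: ((l.drop (i + 1).toNat).take (j + 1 - (i + 1)).toNat) := by
          conv_lhs => rw [List.drop_eq_getElem_cons hil,
            show (j + 1 - i).toNat = (j + 1 - (i + 1)).toNat + 1 from by omega]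
          rw [List.take_succ_cons, show i.toNat + 1 = (i + 1).toNat from by omega]
        rw [hgeti, hseg, pvBS_cons_not p _ _ (by simp [hpfalse])]
        simp
      · rw [if_neg hskipi]
        by_cases hskipj : ¬ p (PySem.List.pyGetD l j ' ')
        · rw [if_pos hskipj]
          rw [ih i (j - 1) _ _ h0 (by omega) (by omega) (by omega)]
          have hpfalse : p l[j.toNat] = false := by
            rw [hgetj] at hskipj; simpa using hskipj
          have hklt : (j - i).toNat < (l.drop i.toNat).length := by
            rw [List.length_drop]; omega
          rw [show (j - 1 + 1 - i).toNat = (j - i).toNat from by omega]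
          rw [show (j + 1 - i).toNat = (j - i).toNat + 1 from by omega]
          have helem : (l.drop i.toNat)[(j - i).toNat]'hklt = l[j.toNat] := by
            apply Option.some.inj
            rw [← List.getElem?_eq_getElem, ← List.getElem?_eq_getElem, List.getElem?_drop]
            congr 1
            omega
          have hseg : (l.drop i.toNat).take ((j - i).toNat + 1) =
              (l.drop i.toNat).take (j - i).toNat ++ [l[j.toNat]] := by
            rw [List.take_add_one, List.getElem?_eq_getElem hklt, helem]
            rfl
          rw [hgetj, hseg, pvBS_snoc_not p _ _ (by simp [hpfalse])]
          simp
        · rw [if_neg hskipj]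
          rw [ih (i + 1) (j - 1) _ _ (by omega) (by omega) (by omega) (by omega)]
          have hptruei : p l[i.toNat] = true := by
            rw [hgeti] at hskipi; simpa using hskipi
          have hptruej : p l[j.toNat] = true := by
            rw [hgetj] at hskipj; simpa using hskipj
          have hklt : (j - (i + 1)).toNat < (l.drop (i + 1).toNat).length := by
            rw [List.length_drop]; omega
          rw [show (j - 1 + 1 - (i + 1)).toNat = (j - (i + 1)).toNat from by omega]
          rw [show (j + 1 - i).toNat = ((j - (i + 1)).toNat + 1) + 1 from by omega]
          have hseg1 : (l.drop i.toNat).take (((j - (i + 1)).toNat + 1) + 1) =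
              l[i.toNat] :: (l.drop (i + 1).toNat).take ((j - (i + 1)).toNat + 1) := by
            rw [List.drop_eq_getElem_cons hil, List.take_succ_cons,
              show i.toNat + 1 = (i + 1).toNat from by omega]
          have helem : (l.drop (i + 1).toNat)[(j - (i + 1)).toNat]'hklt = l[j.toNat] := by
            apply Option.some.inj
            rw [← List.getElem?_eq_getElem, ← List.getElem?_eq_getElem, List.getElem?_drop]
            congr 1
            omega
          have hseg2 : (l.drop (i + 1).toNat).take ((j - (i + 1)).toNat + 1) =
              (l.drop (i + 1).toNat).take (j - (i + 1)).toNat ++ [l[j.toNat]] := by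
            rw [List.take_add_one, List.getElem?_eq_getElem hklt, helem]
            rfl
          rw [hgeti, hgetj, hseg1, hseg2, pvBS_both p _ _ _ hptruei hptruej]
          simp
    · rw [pvTwoPtr, if_neg hij]
      exact pvTwoPtr_exit l p i j front back h0 hjl hij1 hij

-- ===== VERDICT (by name: the statement is the Claim_ definition above) =====
theorem reverse_some_chars_spec : Claim_equal_reverse_some_chars := by
  unfold Claim_equal_reverse_some_chars
  intro s chars _dom
  unfold Spec_reverse_some_chars reverse_some_chars reverse_some_chars_alt
  simp only []
  set mem : Char → Bool := fun c => PySem.Set.contains (PySem.Set.ofList chars.toList) c with hmem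
  set l := s.toList with hl
  congr 1
  rw [pvSel_spec mem l []]
  rw [List.nil_append]
  rw [pvReplay_spec mem l (l.filter mem) [] (by simp)]
  rw [List.nil_append]
  rw [pvTwoPtr_spec l mem l.length 0 (PySem.List.len l - 1) [] []
      (by omega) (by rw [PySem.List.len_eq]; omega) (by rw [PySem.List.len_eq]; omega)
      (by rw [PySem.List.len_eq]; omega)]
  simp only [List.nil_append, List.reverse_nil, List.append_nil]
  rw [show ((0 : Int).toNat) = 0 from rfl, List.drop_zero]
  rw [show (PySem.List.len l - 1 + 1 - 0).toNat = l.length by rw [PySem.List.len_eq]; omega]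
  rw [List.take_length]
  rfl
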